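-- pv_equiv track=rewrite | github.com/mdcourse/mdcourse.github.io | tests/utilities.py | detect_method_boundaries
-- ===== SOURCE A (Python) =====
-- def detect_method_boundaries(method_name, original_file_content):
--     original_start_init = None
--     original_end_init = []
--     last_line = None
--     for cpt, l in enumerate(original_file_content):
--         if ("def" in l) & (method_name in l):
--             original_start_init = cpt
--         elif (":" in l) & ("def" in l) & (method_name not in l):
--             original_end_init.append(cpt)
--         if len(l) > 1:
--             last_line = cpt
--         if (len(l) > 1) & (original_start_init is None):
--             original_start_init = cpt-1
--     if len(original_end_init) > 0:
--         original_end_init = original_end_init[0]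
--     else:
--         original_end_init = last_line
--     if original_end_init < original_start_init:
--         original_end_init = last_line
--     return original_start_init, original_end_init+1
-- ===== SOURCE B (Python) =====
-- def detect_method_boundaries(method_name, original_file_content):
--     # One generic early-exit search, applied to forward/reversed enumerations;
--     # no mutable state and no list of end candidates is ever accumulated.
--     def find(pairs, pred):
--         for i, l in pairs:
--             if pred(l):
--                 return i
--         return None
--
--     fwd = list(enumerate(original_file_content))
--     bwd = list(reversed(fwd))
--     start = find(bwd, lambda l: "def" in l and method_name in l)
--     last_line = find(bwd, lambda l: len(l) > 1)
--     if start is None: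
--         first_nb = find(fwd, lambda l: len(l) > 1)
--         start = None if first_nb is None else first_nb - 1
--     end = find(fwd, lambda l: ":" in l and "def" in l and method_name not in l)
--     if end is None:
--         end = last_line
--     if end < start:
--         end = last_line
--     return start, end + 1
-- ===== Notes on version B (the rewrite author's own statement) =====
-- stated objective: alternative
-- what changed: Replaces A's single stateful accumulating loop (mutable start / list of end candidates / last-line with an in-loop fallback) by four independent short-circuiting searches with a generic find helper, two of them over the reversed enumeration, so no candidate list is ever built and each search stops at its first hit.
import Mathlib
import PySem

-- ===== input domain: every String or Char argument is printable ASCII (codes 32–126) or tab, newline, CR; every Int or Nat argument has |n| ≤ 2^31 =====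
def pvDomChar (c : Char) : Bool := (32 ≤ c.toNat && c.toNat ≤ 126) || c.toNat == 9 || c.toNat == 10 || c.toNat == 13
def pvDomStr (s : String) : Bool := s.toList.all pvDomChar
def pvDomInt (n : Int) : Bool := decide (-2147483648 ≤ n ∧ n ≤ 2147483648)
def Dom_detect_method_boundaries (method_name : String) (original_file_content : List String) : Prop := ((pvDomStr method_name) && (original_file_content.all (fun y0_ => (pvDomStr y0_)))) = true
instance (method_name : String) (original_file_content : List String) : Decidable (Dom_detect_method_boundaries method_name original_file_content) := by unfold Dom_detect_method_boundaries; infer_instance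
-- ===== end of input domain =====

-- B replaces A's single stateful accumulating loop by four short-circuiting searches (two over the reversed enumeration) with one generic find helper ('alternative'); equivalence proved on Pre_ (some line of length > 1), outside which both Pythons raise TypeError.

-- ===== PORT A =====
-- one loop step of A's for-loop; state = (original_start_init, original_end_init, last_line)
def pvStepA (method_name : String) (acc : Option Int × List Int × Option Int) (p : Int × String) : Option Int × List Int × Option Int :=
  let s := acc.1
  let e := acc.2.1
  let last := acc.2.2
  let cpt := p.1
  let l := p.2
  let s := if PySem.Str.isIn "def" l && PySem.Str.isIn method_name l then some cpt else s
  let e := if !(PySem.Str.isIn "def" l && PySem.Str.isIn method_name l) &&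
              (PySem.Str.isIn ":" l && PySem.Str.isIn "def" l && !PySem.Str.isIn method_name l)
           then e ++ [cpt] else e
  let last := if 1 < PySem.Str.len l then some cpt else last
  let s := if 1 < PySem.Str.len l && s.isNone then some (cpt - 1) else s
  (s, e, last)

def detect_method_boundaries (method_name : String) (original_file_content : List String) : Int × Int :=
  let st := (PySem.List.enumerate original_file_content).foldl (pvStepA method_name) (none, [], none)
  let s := st.1
  let el := st.2.1
  let last := st.2.2
  let e : Option Int := match el with
    | x :: _ => some x          -- original_end_init = original_end_init[0]
    | [] => last                -- original_end_init = last_line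
  match s, e with
  | some sv, some ev =>
    if ev < sv then
      match last with
      | some lv => (sv, lv + 1)
      | none => (0, 0)          -- Python: None + 1 raises TypeError (excluded by Pre_)
    else (sv, ev + 1)
  | _, _ => (0, 0)              -- Python: None < None raises TypeError (excluded by Pre_)

-- ===== PORT B =====
-- B's generic early-exit search over (index, line) pairs
def pvFind (pred : String → Bool) : List (Int × String) → Option Int
  | [] => none
  | (i, l) :: rest => if pred l then some i else pvFind pred rest

def pvDefHit (method_name : String) (l : String) : Bool :=
  PySem.Str.isIn "def" l && PySem.Str.isIn method_name l
def pvEndHit (method_name : String) (l : String) : Bool :=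
  PySem.Str.isIn ":" l && PySem.Str.isIn "def" l && !PySem.Str.isIn method_name l
def pvNonblank (l : String) : Bool := decide (1 < PySem.Str.len l)

def detect_method_boundaries_alt (method_name : String) (original_file_content : List String) : Int × Int :=
  let fwd := PySem.List.enumerate original_file_content
  let bwd := fwd.reverse
  let start0 := pvFind (pvDefHit method_name) bwd
  let last_line := pvFind pvNonblank bwd
  let start : Option Int := start0.orElse (fun _ => (pvFind pvNonblank fwd).map (fun f => f - 1))
  let e : Option Int := (pvFind (pvEndHit method_name) fwd).orElse (fun _ => last_line)
  -- in Python a None start/end reaches 'end < start' and raises TypeError; excluded by Pre_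
  start.elim (0, 0) (fun sv =>
    e.elim (0, 0) (fun ev =>
      if ev < sv then last_line.elim (0, 0) (fun lv => (sv, lv + 1))
      else (sv, ev + 1)))

-- ===== PRECONDITION & SPEC =====
-- Pre_ excludes exactly the inputs where every line has len ≤ 1: there both start and end stay None and Python A raises TypeError on 'None < None' (B raises the same way).
def Pre_detect_method_boundaries (method_name : String) (original_file_content : List String) : Prop :=
  ∃ l ∈ original_file_content, 1 < PySem.Str.len l
instance (method_name : String) (original_file_content : List String) : Decidable (Pre_detect_method_boundaries method_name original_file_content) := by unfold Pre_detect_method_boundaries; infer_instance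

def pvWitness_detect_method_boundaries : String × List String :=
  ("foo", ["def foo():", "    pass", "def bar():", "    pass"])

def Spec_detect_method_boundaries (method_name : String) (original_file_content : List String) (out : Int × Int) : Prop := out = detect_method_boundaries_alt method_name original_file_content
instance (method_name : String) (original_file_content : List String) (out : Int × Int) : Decidable (Spec_detect_method_boundaries method_name original_file_content out) := by unfold Spec_detect_method_boundaries; infer_instance

-- ===== CLAIM (what is proved, stated in full; the proofs are below) =====
def Claim_equal_detect_method_boundaries : Prop := ∀ (method_name : String) (original_file_content : List String), Dom_detect_method_boundaries method_name original_file_content → Pre_detect_method_boundaries method_name original_file_content → Spec_detect_method_boundaries method_name original_file_content (detect_method_boundaries method_name original_file_content)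

-- ===== LEMMAS AND PROOFS =====
lemma pv_getLast?_cons {α : Type} (x : α) (xs : List α) :
    (x :: xs).getLast? = match xs.getLast? with | some y => some y | none => some x := by
  cases h : xs.getLast? with
  | none => simp [List.getLast?_eq_none_iff.mp h]
  | some y =>
    cases xs with
    | nil => simp at h
    | cons a as => simpa [List.getLast?_cons_cons] using h

lemma pv_defHit_nonblank (method_name l : String) (h : pvDefHit method_name l = true) :
    pvNonblank l = true := by
  unfold pvDefHit at h
  obtain ⟨h1, -⟩ := Bool.and_eq_true_iff.mp h
  have hinf := (PySem.Str.isIn_iff_infix _ _).mp h1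
  have hlen : 3 ≤ l.toList.length := by simpa using hinf.length_le
  unfold pvNonblank
  simp only [PySem.Str.len_eq, decide_eq_true_eq]
  omega

lemma pv_endHit_nonblank (method_name l : String) (h : pvEndHit method_name l = true) :
    pvNonblank l = true := by
  unfold pvEndHit at h
  obtain ⟨-, h1⟩ := Bool.and_eq_true_iff.mp (Bool.and_eq_true_iff.mp h).1
  have hinf := (PySem.Str.isIn_iff_infix _ _).mp h1
  have hlen : 3 ≤ l.toList.length := by simpa using hinf.length_le
  unfold pvNonblank
  simp only [PySem.Str.len_eq, decide_eq_true_eq]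
  omega

-- B's early-exit search = head of the filtered index list
lemma pv_find_eq_head (pred : String → Bool) (ps : List (Int × String)) :
    pvFind pred ps = ((ps.filter (fun p => pred p.2)).map (·.1)).head? := by
  induction ps with
  | nil => rfl
  | cons p ps ih =>
    obtain ⟨i, l⟩ := p
    by_cases h : pred l = true
    · simp [pvFind, h]
    · simp [pvFind, h, ih]

-- B's backward search = getLast of the forward filtered index list
lemma pv_find_reverse_eq_getLast (pred : String → Bool) (ps : List (Int × String)) :
    pvFind pred ps.reverse = ((ps.filter (fun p => pred p.2)).map (·.1)).getLast? := by
  rw [pv_find_eq_head, List.filter_reverse, List.map_reverse, List.head?_reverse]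

-- the loop of A, fully characterised by the three filtered scans
lemma pv_loopA_eq (method_name : String) (ps : List (Int × String))
    (s0 : Option Int) (e0 : List Int) (l0 : Option Int) :
    ps.foldl (pvStepA method_name) (s0, e0, l0) =
      ((match ((ps.filter (fun p => pvDefHit method_name p.2)).map (·.1)).getLast? with
        | some d => some d
        | none => match s0 with
          | some s => some s
          | none => match ((ps.filter (fun p => pvNonblank p.2)).map (·.1)).head? with
            | some f => some (f - 1)
            | none => none),
       e0 ++ (ps.filter (fun p => pvEndHit method_name p.2)).map (·.1),
       (match ((ps.filter (fun p => pvNonblank p.2)).map (·.1)).getLast? with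
        | some x => some x
        | none => l0)) := by
  induction ps generalizing s0 e0 l0 with
  | nil =>
    simp only [List.foldl_nil, List.filter_nil, List.map_nil, List.getLast?_nil,
      List.head?_nil, List.append_nil]
    cases s0 <;> rfl
  | cons p ps ih =>
    obtain ⟨c, l⟩ := p
    by_cases hnb : pvNonblank l = true
    · have hl : (1 : Int) < PySem.Str.len l := of_decide_eq_true hnb
      have hdec : decide ((1 : Int) < PySem.Str.len l) = true := hnb
      by_cases hd : pvDefHit method_name l = true
      · have hc1 : (PySem.Str.isIn "def" l && PySem.Str.isIn method_name l) = true := hd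
        have hhe : pvEndHit method_name l = false := by
          have h2 : PySem.Str.isIn method_name l = true := (Bool.and_eq_true_iff.mp hc1).2
          unfold pvEndHit
          rw [h2]
          simp
        have hstep : pvStepA method_name (s0, e0, l0) (c, l) = (some c, e0, some c) := by
          simp only [pvStepA, hc1, hdec, if_pos hl, Bool.not_true, Bool.false_and,
            Option.isNone_some, Bool.and_false, Bool.false_eq_true, if_true, if_false]
        rw [List.foldl_cons, hstep, ih]
        simp only [List.filter_cons, hd, hhe, hnb, if_true, Bool.false_eq_true, if_false,
          List.map_cons]
        rw [pv_getLast?_cons, pv_getLast?_cons]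
        cases ((ps.filter (fun p => pvDefHit method_name p.2)).map (·.1)).getLast? <;>
          cases ((ps.filter (fun p => pvNonblank p.2)).map (·.1)).getLast? <;> rfl
      · have hc1 : (PySem.Str.isIn "def" l && PySem.Str.isIn method_name l) = false := by
          cases h : (PySem.Str.isIn "def" l && PySem.Str.isIn method_name l)
          · rfl
          · exact absurd h hd
        by_cases he : pvEndHit method_name l = true
        · have hce : (PySem.Str.isIn ":" l && PySem.Str.isIn "def" l &&
              !PySem.Str.isIn method_name l) = true := he
          have hstep : pvStepA method_name (s0, e0, l0) (c, l) =
              ((match s0 with | some s => some s | none => some (c - 1)), e0 ++ [c], some c) := by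
            simp only [pvStepA, hc1, hce, hdec, if_pos hl, Bool.not_false, Bool.true_and,
              Bool.false_eq_true, if_false, if_true]
            cases s0 <;> rfl
          rw [List.foldl_cons, hstep, ih]
          simp only [List.filter_cons, hd, he, hnb, if_true, Bool.false_eq_true, if_false,
            List.map_cons, List.head?_cons, List.append_assoc, List.singleton_append]
          rw [pv_getLast?_cons]
          cases ((ps.filter (fun p => pvDefHit method_name p.2)).map (·.1)).getLast? <;>
            cases s0 <;>
            cases ((ps.filter (fun p => pvNonblank p.2)).map (·.1)).getLast? <;> rfl
        · have hce : (PySem.Str.isIn ":" l && PySem.Str.isIn "def" l &&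
              !PySem.Str.isIn method_name l) = false := by
            cases h : (PySem.Str.isIn ":" l && PySem.Str.isIn "def" l &&
                !PySem.Str.isIn method_name l)
            · rfl
            · exact absurd h he
          have hstep : pvStepA method_name (s0, e0, l0) (c, l) =
              ((match s0 with | some s => some s | none => some (c - 1)), e0, some c) := by
            simp only [pvStepA, hc1, hce, hdec, if_pos hl, Bool.not_false, Bool.true_and,
              Bool.and_false, Bool.false_eq_true, if_false]
            cases s0 <;> rfl
          rw [List.foldl_cons, hstep, ih]
          simp only [List.filter_cons, hd, he, hnb, if_true, Bool.false_eq_true, if_false,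
            List.map_cons, List.head?_cons]
          rw [pv_getLast?_cons]
          cases ((ps.filter (fun p => pvDefHit method_name p.2)).map (·.1)).getLast? <;>
            cases s0 <;>
            cases ((ps.filter (fun p => pvNonblank p.2)).map (·.1)).getLast? <;> rfl
    · have hd : pvDefHit method_name l = false := by
        cases h : pvDefHit method_name l
        · rfl
        · exact absurd (pv_defHit_nonblank _ _ h) hnb
      have he : pvEndHit method_name l = false := by
        cases h : pvEndHit method_name l
        · rfl
        · exact absurd (pv_endHit_nonblank _ _ h) hnb
      have hdec : decide ((1 : Int) < PySem.Str.len l) = false := by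
        cases h : decide ((1 : Int) < PySem.Str.len l)
        · rfl
        · exact absurd h hnb
      have hnl : ¬ (1 : Int) < PySem.Str.len l := of_decide_eq_false hdec
      have hc1 : (PySem.Str.isIn "def" l && PySem.Str.isIn method_name l) = false := hd
      have hce : (PySem.Str.isIn ":" l && PySem.Str.isIn "def" l &&
          !PySem.Str.isIn method_name l) = false := he
      have hstep : pvStepA method_name (s0, e0, l0) (c, l) = (s0, e0, l0) := by
        simp only [pvStepA, hc1, hce, hdec, if_neg hnl, Bool.not_false, Bool.true_and,
          Bool.false_and, Bool.false_eq_true, if_false]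
      rw [List.foldl_cons, hstep, ih]
      simp only [List.filter_cons, hd, he, hnb, Bool.false_eq_true, if_false]

-- ===== VERDICT (by name: the statement is the Claim_ definition above) =====
theorem detect_method_boundaries_spec : Claim_equal_detect_method_boundaries := by
  intro method_name content _ _
  unfold Spec_detect_method_boundaries detect_method_boundaries detect_method_boundaries_alt
  rw [pv_loopA_eq]
  simp only [pv_find_reverse_eq_getLast]
  simp only [pv_find_eq_head]
  simp only [List.nil_append]
  cases (((PySem.List.enumerate content).filter (fun p => pvDefHit method_name p.2)).map (·.1)).getLast? <;>
  cases (((PySem.List.enumerate content).filter (fun p => pvNonblank p.2)).map (·.1)).getLast? <;>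
  cases (((PySem.List.enumerate content).filter (fun p => pvNonblank p.2)).map (·.1)).head? <;>
  cases ((PySem.List.enumerate content).filter (fun p => pvEndHit method_name p.2)).map (·.1) <;>
  simp [Option.orElse, Option.elim]
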